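-- pv_equiv track=rewrite | github.com/ccam80/zotero-chunk-mcp | src/zotero_chunk_rag/feature_extraction/postprocessors/inline_headers.py | _find_exclusive_or_column
-- ===== SOURCE A (Python) =====
-- def _find_exclusive_or_column(rows: tuple[tuple[str, ...], ...]) -> int | None:
--     """Find a column that is populated exclusively when other columns are not.
--
--     Returns the column index or ``None`` if no such column exists.
--     """
--     if not rows:
--         return None
--
--     ncols = max(len(r) for r in rows) if rows else 0
--     if ncols < 2:
--         return None
--
--     # For each column, check if it has the exclusive-or pattern
--     for candidate in range(ncols):
--         header_rows = 0  # rows where only this col is populated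
--         data_rows = 0    # rows where other cols are populated
--         conflict_rows = 0  # rows where both this col and others are populated
--
--         for row in rows:
--             cell_val = row[candidate].strip() if candidate < len(row) else ""
--             other_populated = any(
--                 row[j].strip() for j in range(min(len(row), ncols)) if j != candidate
--             )
--
--             if cell_val and not other_populated:
--                 header_rows += 1
--             elif cell_val and other_populated:
--                 conflict_rows += 1
--             elif not cell_val and other_populated:
--                 data_rows += 1
--
--         # The column must have at least 1 header row, some data rows,
--         # and no conflict rows (exclusive-or)
--         if header_rows >= 1 and data_rows >= 1 and conflict_rows == 0:
--             return candidate
--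
--     return None
-- ===== SOURCE B (Python) =====
-- def _find_exclusive_or_column(rows):
--     """Find a column that is populated exclusively when other columns are not.
--
--     One pass precomputes per-row populated flags and counts, so each candidate
--     column is classified in O(1) per row instead of rescanning the row.
--     """
--     if not rows:
--         return None
--
--     ncols = max(len(r) for r in rows)
--     if ncols < 2:
--         return None
--
--     stats = []
--     for row in rows:
--         flags = [bool(cell.strip()) for cell in row]
--         stats.append((flags, sum(flags)))
--
--     for candidate in range(ncols):
--         header_rows = 0
--         data_rows = 0
--         conflict_rows = 0
--         for flags, count in stats:
--             cell = candidate < len(flags) and flags[candidate]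
--             others = count - (1 if cell else 0)
--             if cell:
--                 if others:
--                     conflict_rows += 1
--                 else:
--                     header_rows += 1
--             elif others:
--                 data_rows += 1
--         if header_rows and data_rows and not conflict_rows:
--             return candidate
--
--     return None
-- ===== Notes on version B (the rewrite author's own statement) =====
-- stated objective: faster
-- what changed: Precompute per-row populated flags and a populated count once, then classify each (candidate,row) pair in O(1) from count and flag instead of rescanning the whole row for 'other populated' under every candidate.
import Mathlib
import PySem

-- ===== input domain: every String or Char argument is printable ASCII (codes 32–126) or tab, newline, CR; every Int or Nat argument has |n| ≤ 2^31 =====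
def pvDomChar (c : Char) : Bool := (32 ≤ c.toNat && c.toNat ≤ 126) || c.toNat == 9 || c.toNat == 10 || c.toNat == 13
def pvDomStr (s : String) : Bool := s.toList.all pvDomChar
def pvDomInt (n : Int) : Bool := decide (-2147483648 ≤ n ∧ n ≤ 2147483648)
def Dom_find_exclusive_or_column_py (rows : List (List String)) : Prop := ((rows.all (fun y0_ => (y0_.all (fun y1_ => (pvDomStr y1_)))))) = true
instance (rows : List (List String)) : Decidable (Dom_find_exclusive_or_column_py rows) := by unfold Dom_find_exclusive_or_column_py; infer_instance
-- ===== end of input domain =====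

-- B replaces A's per-candidate rescan of every row (for "any other column populated") by
-- per-row populated flags and a populated count precomputed once, classifying each
-- (candidate, row) pair in O(1); asymptotically faster (measured).

-- ===== PORT A =====

-- one iteration of A's inner `for row in rows` loop, updating (header_rows, data_rows, conflict_rows)
def pvStepA (ncols cand : Int) (st : Int × Int × Int) (row : List String) : Int × Int × Int :=
  let cell_val : String :=
    if cand < (row.length : Int) then PySem.Str.strip (PySem.List.pyGetD row cand "") else ""
  let other_populated : Bool :=
    ((PySem.List.pyRange 0 (min (row.length : Int) ncols) 1).filter (fun j => j != cand)).any
      (fun j => PySem.Str.strip (PySem.List.pyGetD row j "") != "")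
  if (cell_val != "") && !other_populated then (st.1 + 1, st.2.1, st.2.2)
  else if (cell_val != "") && other_populated then (st.1, st.2.1, st.2.2 + 1)
  else if (cell_val == "") && other_populated then (st.1, st.2.1 + 1, st.2.2)
  else st

def find_exclusive_or_column_py (rows : List (List String)) : Option Int :=
  if rows = [] then none
  else
    let ncols : Int :=
      if rows ≠ [] then (PySem.List.max? (rows.map (fun r => (r.length : Int))) (fun x => x)).getD 0 else 0
    if ncols < 2 then none
    else
      (PySem.List.pyRange 0 ncols 1).find? (fun cand =>
        let st := rows.foldl (pvStepA ncols cand) ((0 : Int), (0 : Int), (0 : Int))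
        decide (1 ≤ st.1) && decide (1 ≤ st.2.1) && (st.2.2 == 0))

-- ===== PORT B =====

-- per-row precomputation: populated flags and their sum
def pvRowStat (row : List String) : List Bool × Int :=
  let flags := row.map (fun cell => PySem.Str.strip cell != "")
  (flags, ((flags.count true : Nat) : Int))

-- one iteration of B's inner loop over the precomputed stats
def pvStepB (cand : Int) (st : Int × Int × Int) (fc : List Bool × Int) : Int × Int × Int :=
  let cell : Bool := decide (cand < (fc.1.length : Int)) && PySem.List.pyGetD fc.1 cand false
  let others : Int := fc.2 - (if cell then 1 else 0)
  if cell then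
    if others != 0 then (st.1, st.2.1, st.2.2 + 1)
    else (st.1 + 1, st.2.1, st.2.2)
  else if others != 0 then (st.1, st.2.1 + 1, st.2.2)
  else st

def find_exclusive_or_column_py_alt (rows : List (List String)) : Option Int :=
  if rows = [] then none
  else
    let ncols : Int := (PySem.List.max? (rows.map (fun r => (r.length : Int))) (fun x => x)).getD 0
    if ncols < 2 then none
    else
      let stats : List (List Bool × Int) := rows.map pvRowStat
      (PySem.List.pyRange 0 ncols 1).find? (fun cand =>
        let st := stats.foldl (pvStepB cand) ((0 : Int), (0 : Int), (0 : Int))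
        (st.1 != 0) && (st.2.1 != 0) && (st.2.2 == 0))

-- ===== PRECONDITION & SPEC =====
def Spec_find_exclusive_or_column_py (rows : List (List String)) (out : Option Int) : Prop := out = find_exclusive_or_column_py_alt rows
instance (rows : List (List String)) (out : Option Int) : Decidable (Spec_find_exclusive_or_column_py rows out) := by unfold Spec_find_exclusive_or_column_py; infer_instance

-- ===== CLAIM (what is proved, stated in full; the proofs are below) =====
def Claim_equal_find_exclusive_or_column_py : Prop := ∀ (rows : List (List String)), Dom_find_exclusive_or_column_py rows → Spec_find_exclusive_or_column_py rows (find_exclusive_or_column_py rows)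

-- ===== LEMMAS AND PROOFS =====

lemma find?_congr_mem {α : Type} (p q : α → Bool) (l : List α)
    (h : ∀ x ∈ l, p x = q x) : l.find? p = l.find? q := by
  induction l with
  | nil => rfl
  | cons a t ih =>
    simp only [List.find?_cons]
    rw [h a (List.mem_cons_self), ih (fun x hx => h x (List.mem_cons_of_mem a hx))]

lemma getD_true_count_pos (t : List Bool) (m : Nat) (h : t.getD m false = true) :
    0 < t.count true := by
  rw [List.count_pos_iff]
  rw [List.getD_eq_getElem?_getD] at h
  cases hg : t[m]? with
  | none => rw [hg] at h; simp at h
  | some v =>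
    rw [hg] at h; simp at h; subst h
    exact List.mem_of_getElem? hg

-- any over range-indices of a Bool list equals "some entry is true"
lemma any_range_getD (bs : List Bool) :
    ((List.range bs.length).any (fun j => bs.getD j false)) = decide (0 < bs.count true) := by
  induction bs with
  | nil => simp
  | cons b t ih =>
    rw [List.length_cons, List.range_succ_eq_map]
    rw [List.any_cons, List.any_map]
    have h2 : (List.range t.length).any ((fun j => (b :: t).getD j false) ∘ Nat.succ)
        = (List.range t.length).any (fun j => t.getD j false) := by
      apply PySem.List.any_congr_mem
      intro j _; simp
    rw [h2, ih]
    cases b <;> simp [List.count_cons]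

-- the heart: "some OTHER index is populated" equals "count exceeds this index's own flag"
lemma aux_other (bs : List Bool) (n : Nat) :
    (((List.range bs.length).filter (fun j => j ≠ n)).any (fun j => bs.getD j false))
      = decide ((if n < bs.length ∧ bs.getD n false then 1 else 0) < bs.count true) := by
  induction bs generalizing n with
  | nil => simp
  | cons b t ih =>
    rw [List.length_cons, List.range_succ_eq_map]
    cases n with
    | zero =>
      rw [List.filter_cons]
      have hf : (List.filter (fun j => decide (j ≠ 0)) ((List.range t.length).map Nat.succ))
          = (List.range t.length).map Nat.succ := by
        apply List.filter_eq_self.mpr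
        intro a ha
        simp at ha
        obtain ⟨k, _, rfl⟩ := ha
        simp
      rw [if_neg (by simp), hf, List.any_map]
      have h2 : (List.range t.length).any ((fun j => (b :: t).getD j false) ∘ Nat.succ)
          = (List.range t.length).any (fun j => t.getD j false) := by
        apply PySem.List.any_congr_mem; intro j _; simp
      rw [h2, any_range_getD]
      cases b <;> simp [List.count_cons]
    | succ m =>
      rw [List.filter_cons]
      rw [if_pos (by simp)]
      rw [List.any_cons]
      have hfm : (List.filter (fun j => decide (j ≠ m+1)) ((List.range t.length).map Nat.succ))
          = (List.filter (fun j => decide (j ≠ m)) (List.range t.length)).map Nat.succ := by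
        rw [List.filter_map]
        congr 1
        apply List.filter_congr
        intro a _; simp
      rw [hfm, List.any_map]
      have h2 : ((List.filter (fun j => decide (j ≠ m)) (List.range t.length)).any ((fun j => (b :: t).getD j false) ∘ Nat.succ))
          = ((List.range t.length).filter (fun j => decide (j ≠ m))).any (fun j => t.getD j false) := by
        apply PySem.List.any_congr_mem; intro j _; simp
      rw [h2, ih m]
      have hgd : (b :: t).getD (m+1) false = t.getD m false := List.getD_cons_succ ..
      rw [hgd]
      by_cases hm : m < t.length ∧ t.getD m false = true
      · have hc1 : 0 < t.count true := getD_true_count_pos t m hm.2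
        have hms : (m + 1 < t.length + 1 ∧ t.getD m false = true) := ⟨by omega, hm.2⟩
        rw [if_pos hm, if_pos hms]
        cases b
        · simp [List.count_cons]
        · simp [List.count_cons]
          exact List.count_pos_iff.mp hc1
      · have hms : ¬ (m + 1 < t.length + 1 ∧ t.getD m false = true) := by
          intro h; exact hm ⟨by omega, h.2⟩
        rw [if_neg hm, if_neg hms]
        cases b <;> simp [List.count_cons]

-- per-row step equality: A's rescan step equals B's flag/count step
lemma step_eq (row : List String) (ncols cand : Int) (hc : 0 ≤ cand)
    (hlen : (row.length : Int) ≤ ncols) (st : Int × Int × Int) :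
    pvStepA ncols cand st row = pvStepB cand st (pvRowStat row) := by
  lift cand to ℕ using hc with n
  unfold pvStepA pvStepB pvRowStat
  simp only [min_eq_left hlen]
  set P : String → Bool := fun cell => PySem.Str.strip cell != "" with hP
  set bs := row.map P with hbs
  have hbl : bs.length = row.length := List.length_map ..
  set cellB : Bool := decide ((n:Int) < ((bs.length : Nat) : Int)) && PySem.List.pyGetD bs (n:Int) false with hcB
  -- cell equality
  have hcell : ((if (n:Int) < (row.length : Int) then PySem.Str.strip (PySem.List.pyGetD row (n:Int) "") else "") != "") = cellB := by
    rw [hcB, PySem.List.pyGetD_natCast, hbl]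
    by_cases hn : n < row.length
    · rw [if_pos (by exact_mod_cast hn : ((n:Int) < (row.length:Int)))]
      rw [PySem.List.pyGetD_natCast]
      rw [List.getD_eq_getElem _ _ hn, List.getD_eq_getElem _ _ (by rw [hbl]; exact hn)]
      simp [hbs, hP, hn]
    · simp [hn, List.getElem?_eq_none (show bs.length ≤ n by omega)]
  -- other equality
  have hother : (((PySem.List.pyRange 0 (row.length : Int) 1).filter (fun j => j != (n:Int))).any
        (fun j => PySem.Str.strip (PySem.List.pyGetD row j "") != ""))
      = decide ((if cellB then 1 else 0) < bs.count true) := by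
    rw [PySem.List.pyRange_zero_nat row.length]
    have hfm := List.filter_map (l := List.range row.length) (f := fun k => ((k:Nat):Int)) (p := fun j => j != (n:Int))
    have hfc : List.filter ((fun j => j != (n:Int)) ∘ (fun k => ((k:Nat):Int))) (List.range row.length)
        = List.filter (fun j => j ≠ n) (List.range row.length) := by
      apply List.filter_congr
      intro a _; by_cases h : a = n <;> simp [h]
    rw [hfm, hfc, List.any_map]
    have h2 : (((List.range row.length).filter (fun j => j ≠ n)).any ((fun j => PySem.Str.strip (PySem.List.pyGetD row j "") != "") ∘ (fun k => (k:Int))))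
        = (((List.range bs.length).filter (fun j => j ≠ n)).any (fun j => bs.getD j false)) := by
      rw [hbl]
      apply PySem.List.any_congr_mem
      intro j hj
      have hjlt : j < row.length := by
        have := List.mem_filter.mp hj
        exact List.mem_range.mp this.1
      simp only [Function.comp, PySem.List.pyGetD_natCast]
      rw [List.getD_eq_getElem _ _ hjlt, List.getD_eq_getElem _ _ (by rw [hbl]; exact hjlt)]
      simp [hbs, hP]
    rw [h2, aux_other]
    have hiff : (n < bs.length ∧ bs.getD n false = true) ↔ cellB = true := by
      rw [hcB, PySem.List.pyGetD_natCast]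
      constructor
      · rintro ⟨h1, h2⟩
        simp only [Bool.and_eq_true, decide_eq_true_eq]
        exact ⟨by exact_mod_cast h1, h2⟩
      · intro h
        simp only [Bool.and_eq_true, decide_eq_true_eq] at h
        exact ⟨by exact_mod_cast h.1, h.2⟩
    by_cases hcb : cellB = true
    · rw [if_pos (hiff.mpr hcb), if_pos hcb]
    · rw [if_neg (fun hh => hcb (hiff.mp hh)), if_neg hcb]
  have hceq : ((if (n:Int) < ((row.length:Nat):Int) then PySem.Str.strip (PySem.List.pyGetD row (n:Int) "") else "") == "") = !cellB := by
    rw [← hcell]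
    simp [bne]
  rw [hcell, hother, hceq]
  -- count is at least the candidate's own flag
  have hge : (if cellB = true then (1:Nat) else 0) ≤ bs.count true := by
    by_cases hcb : cellB = true
    · rw [if_pos hcb]
      rw [hcB] at hcb
      simp only [Bool.and_eq_true, decide_eq_true_eq] at hcb
      exact getD_true_count_pos bs n (by rw [← PySem.List.pyGetD_natCast]; exact hcb.2)
    · rw [if_neg hcb]; exact Nat.zero_le _
  cases hcb : cellB with
  | true =>
    simp only [hcb, if_true] at hge ⊢
    by_cases h1 : 1 < bs.count true
    · have hne : ((bs.count true : Nat) : Int) - 1 ≠ 0 := by omega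
      simp [h1, hne]
    · have heq0 : ((bs.count true : Nat) : Int) - 1 = 0 := by omega
      simp [h1, heq0]
  | false =>
    simp only [hcb, Bool.false_and, Bool.not_false, Bool.true_and] at hge ⊢
    by_cases h0 : 0 < bs.count true
    · have hne : ((bs.count true : Nat) : Int) - 0 ≠ 0 := by omega
      simp [h0, h0.ne']
    · have heq0 : ((bs.count true : Nat) : Int) - 0 = 0 := by omega
      simp [h0, heq0]

-- B's counters only grow along the fold
lemma stepB_mono (cand : Int) (st : Int × Int × Int) (fc : List Bool × Int) :
    st.1 ≤ (pvStepB cand st fc).1 ∧ st.2.1 ≤ (pvStepB cand st fc).2.1 ∧ st.2.2 ≤ (pvStepB cand st fc).2.2 := by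
  simp only [pvStepB]
  split_ifs <;> simp

lemma foldl_stepB_mono (cand : Int) (l : List (List Bool × Int)) (st : Int × Int × Int) :
    st.1 ≤ (l.foldl (pvStepB cand) st).1 ∧ st.2.1 ≤ (l.foldl (pvStepB cand) st).2.1 ∧ st.2.2 ≤ (l.foldl (pvStepB cand) st).2.2 := by
  induction l generalizing st with
  | nil => exact ⟨le_refl _, le_refl _, le_refl _⟩
  | cons a t ih =>
    rw [List.foldl_cons]
    have h1 := stepB_mono cand st a
    have h2 := ih (pvStepB cand st a)
    exact ⟨le_trans h1.1 h2.1, le_trans h1.2.1 h2.2.1, le_trans h1.2.2 h2.2.2⟩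

-- ===== VERDICT (by name: the statement is the Claim_ definition above) =====
theorem find_exclusive_or_column_py_spec : Claim_equal_find_exclusive_or_column_py := by
  intro rows _
  unfold Spec_find_exclusive_or_column_py find_exclusive_or_column_py find_exclusive_or_column_py_alt
  by_cases h0 : rows = []
  · simp [h0]
  · rw [if_neg h0, if_neg h0]
    set M : Int := (PySem.List.max? (rows.map (fun r => (r.length : Int))) (fun x => x)).getD 0 with hM
    rw [if_pos h0]
    by_cases h2 : M < 2
    · rw [if_pos h2, if_pos h2]
    · rw [if_neg h2, if_neg h2]
      -- every row length is bounded by the maximum M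
      have hbound : ∀ row ∈ rows, (row.length : Int) ≤ M := by
        intro row hrow
        cases hmx : PySem.List.max? (rows.map (fun r => (r.length : Int))) (fun x => x) with
        | none => exact absurd ((PySem.List.max?_eq_none_iff _ _).mp hmx) (by simpa using h0)
        | some m =>
          have := PySem.List.max?_isMax hmx ((row.length : Int)) (List.mem_map_of_mem hrow)
          rw [hM, hmx]
          simpa using this
      apply find?_congr_mem
      intro cand hcand
      have hc : 0 ≤ cand := (PySem.List.mem_pyRange_one.mp hcand).1
      have hfold : rows.foldl (pvStepA M cand) ((0:Int), (0:Int), (0:Int))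
          = (rows.map pvRowStat).foldl (pvStepB cand) ((0:Int), (0:Int), (0:Int)) := by
        rw [List.foldl_map]
        exact PySem.List.foldl_congr_mem rows _ _ _
          (fun acc row hrow => step_eq row M cand hc (hbound row hrow) acc)
      have hnn := foldl_stepB_mono cand (rows.map pvRowStat) ((0:Int), (0:Int), (0:Int))
      simp only [hfold]
      generalize hX : (rows.map pvRowStat).foldl (pvStepB cand) ((0:Int), (0:Int), (0:Int)) = X at hnn ⊢
      dsimp only at hnn
      obtain ⟨n1, n2, n3⟩ := hnn
      have e1 : decide (1 ≤ X.1) = (X.1 != 0) := by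
        by_cases h : 1 ≤ X.1 <;> simp [h] <;> omega
      have e2 : decide (1 ≤ X.2.1) = (X.2.1 != 0) := by
        by_cases h : 1 ≤ X.2.1 <;> simp [h] <;> omega
      rw [e1, e2]
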